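-- pv_equiv track=rewrite | github.com/updaun/CodingTest | programmers/2022/221227_1.py | solution
-- ===== SOURCE A (Python) =====
-- def solution(s):
--     stack = []
--     for i in range(len(s)):
--         if len(stack) == 0:
--             stack.append(s[i])
--         else:
--             if stack[-1] == s[i]:
--                 stack.pop()
--             else:
--                 stack.append(s[i])
--     if stack:
--         return 0
--     return 1
-- ===== SOURCE B (Python) =====
-- def _one_pass(s):
--     out = []
--     i = 0
--     while i < len(s):
--         if i + 1 < len(s) and s[i] == s[i + 1]:
--             i += 2
--         else:
--             out.append(s[i])
--             i += 1
--     return "".join(out)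
--
--
-- def solution(s):
--     cur = s
--     while True:
--         nxt = _one_pass(cur)
--         if len(nxt) == len(cur):
--             break
--         cur = nxt
--     return 1 if cur == "" else 0
-- ===== Notes on version B (the rewrite author's own statement) =====
-- stated objective: alternative
-- what changed: Replaces the single-pass stack with a fixpoint iteration that repeatedly deletes non-overlapping adjacent equal pairs in left-to-right passes until a pass removes nothing, then checks emptiness.
import Mathlib
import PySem

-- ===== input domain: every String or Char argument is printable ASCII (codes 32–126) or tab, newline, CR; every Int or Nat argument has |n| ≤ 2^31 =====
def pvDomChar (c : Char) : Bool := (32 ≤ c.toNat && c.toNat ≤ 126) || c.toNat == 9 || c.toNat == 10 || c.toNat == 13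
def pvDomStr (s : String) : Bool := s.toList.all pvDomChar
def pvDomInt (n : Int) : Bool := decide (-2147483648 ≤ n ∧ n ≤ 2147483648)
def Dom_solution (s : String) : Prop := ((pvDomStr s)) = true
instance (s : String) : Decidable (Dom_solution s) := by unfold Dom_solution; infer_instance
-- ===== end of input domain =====

-- B replaces A's one-pass stack by repeated passes that delete adjacent equal pairs until
-- nothing changes (objective: a genuinely different, equally natural algorithm; not faster).

-- ===== PORT A =====
-- Python list used as a stack; ported with the top of the stack at the HEAD of the list
-- (append → cons, stack[-1] → head?, pop → tail), branches in the same order.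
def pvStepA (stack : List Char) (c : Char) : List Char :=
  if stack.length = 0 then c :: stack
  else if stack.head? = some c then stack.tail
  else c :: stack

-- 'for i in range(len(s))' reading s[i] in order = iteration over the characters of s.
def solution (s : String) : Int :=
  let stack := s.toList.foldl pvStepA []
  if stack ≠ [] then 0 else 1

-- ===== PORT B =====
-- _one_pass: walk left to right; drop a pair of adjacent equal chars, else keep the char.
def pvOnePass : List Char → List Char
  | [] => []
  | [c] => [c]
  | c :: c' :: rest => if c = c' then pvOnePass rest else c :: pvOnePass (c' :: rest)

theorem pvOnePass_length_le : ∀ l : List Char, (pvOnePass l).length ≤ l.length := by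
  intro l
  induction l using pvOnePass.induct with
  | case1 => simp [pvOnePass]
  | case2 c => simp [pvOnePass]
  | case3 c' rest ih =>
    simp only [pvOnePass]
    simpa using Nat.le_add_right_of_le (Nat.le_succ_of_le ih)
  | case4 c c' rest h ih =>
    simp only [pvOnePass, if_neg h]
    simpa using ih

-- the 'while True' fixpoint loop of B's solution
def pvLoop (l : List Char) : List Char :=
  let t := pvOnePass l
  if t.length = l.length then l else pvLoop t
termination_by l.length
decreasing_by
  exact Nat.lt_of_le_of_ne (pvOnePass_length_le l) (by simpa using ‹¬ _›)

def solution_alt (s : String) : Int :=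
  let cur := pvLoop s.toList
  if cur = [] then 1 else 0

-- ===== PRECONDITION & SPEC =====
def Spec_solution (s : String) (out : Int) : Prop := out = solution_alt s
instance (s : String) (out : Int) : Decidable (Spec_solution s out) := by unfold Spec_solution; infer_instance

-- ===== CLAIM (what is proved, stated in full; the proofs are below) =====
def Claim_equal_solution : Prop := ∀ (s : String), Dom_solution s → Spec_solution s (solution s)

-- ===== LEMMAS AND PROOFS =====

-- A's stack never holds two adjacent equal characters.
theorem pvStepA_chain {st : List Char} (h : st.IsChain (· ≠ ·)) (c : Char) :
    (pvStepA st c).IsChain (· ≠ ·) := by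
  unfold pvStepA
  split
  · next h0 =>
    have : st = [] := List.length_eq_zero_iff.mp h0
    subst this; simp
  · split
    · exact h.tail
    · next h0 hne =>
      rw [List.isChain_cons]
      refine ⟨?_, h⟩
      intro y hy hcy
      exact hne (by rw [hy, hcy])

-- Pushing then cancelling (or cancelling then re-pushing) the same char is the identity.
theorem pvStepA_step {st : List Char} (h : st.IsChain (· ≠ ·)) (c : Char) :
    pvStepA (pvStepA st c) c = st := by
  unfold pvStepA
  rcases st with _ | ⟨d, t⟩
  · simp
  · by_cases hdc : d = c
    · subst hdc
      simp only [List.length_cons, List.head?_cons, List.tail_cons,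
        if_neg (Nat.succ_ne_zero _)]
      rcases t with _ | ⟨e, u⟩
      · simp
      · have hed : d ≠ e := (List.isChain_cons.mp h).1 e rfl
        have h1 : ¬ (some e = some d) := fun h' => hed (Option.some.inj h').symm
        simp [h1]
    · have h1 : ¬ (some d = some c) := fun h' => hdc (Option.some.inj h')
      simp [h1]

-- One pass of pair deletion does not change A's stack.
theorem foldl_pvOnePass : ∀ (l : List Char) (st : List Char), st.IsChain (· ≠ ·) →
    (pvOnePass l).foldl pvStepA st = l.foldl pvStepA st := by
  intro l
  induction l using pvOnePass.induct with
  | case1 => intro st _; rfl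
  | case2 c => intro st _; rfl
  | case3 c' rest ih =>
    intro st hst
    have hp : pvOnePass (c' :: c' :: rest) = pvOnePass rest := by simp [pvOnePass]
    rw [hp, List.foldl_cons, List.foldl_cons, pvStepA_step hst, ih st hst]
  | case4 c c' rest h ih =>
    intro st hst
    simp only [pvOnePass, if_neg h, List.foldl_cons]
    exact ih (pvStepA st c) (pvStepA_chain hst c)

-- A pass that removes nothing leaves the list literally unchanged.
theorem pvOnePass_eq_or_lt : ∀ l : List Char,
    pvOnePass l = l ∨ (pvOnePass l).length + 2 ≤ l.length := by
  intro l
  induction l using pvOnePass.induct with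
  | case1 => left; rfl
  | case2 c => left; rfl
  | case3 c' rest ih =>
    right
    have hp : pvOnePass (c' :: c' :: rest) = pvOnePass rest := by simp [pvOnePass]
    rw [hp, List.length_cons, List.length_cons]
    have := pvOnePass_length_le rest
    omega
  | case4 c c' rest h ih =>
    simp only [pvOnePass, if_neg h]
    rcases ih with heq | hlt
    · left; rw [heq]
    · right; simp only [List.length_cons] at *; omega

-- A fixpoint of the pass has no adjacent equal characters.
theorem pvOnePass_fix_chain : ∀ l : List Char, pvOnePass l = l → l.IsChain (· ≠ ·) := by
  intro l
  induction l using pvOnePass.induct with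
  | case1 => intro _; simp
  | case2 c => intro _; simp
  | case3 c' rest ih =>
    intro hfix
    exfalso
    have hlen : (pvOnePass (c' :: c' :: rest)).length = rest.length + 2 := by
      rw [hfix]; simp
    have hp : pvOnePass (c' :: c' :: rest) = pvOnePass rest := by simp [pvOnePass]
    have hle : (pvOnePass (c' :: c' :: rest)).length ≤ rest.length := by
      rw [hp]; exact pvOnePass_length_le rest
    omega
  | case4 c c' rest h ih =>
    intro hfix
    simp only [pvOnePass, if_neg h, List.cons.injEq, true_and] at hfix
    refine List.isChain_cons.mpr ⟨?_, ih hfix⟩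
    intro y hy
    simp only [List.head?_cons, Option.mem_def, Option.some.injEq] at hy
    subst hy
    exact h

-- B's loop does not change A's stack.
theorem foldl_pvLoop : ∀ l : List Char,
    (pvLoop l).foldl pvStepA [] = l.foldl pvStepA [] := by
  intro l
  induction l using pvLoop.induct with
  | case1 l t heq =>
    rw [pvLoop, if_pos (show (pvOnePass l).length = l.length from heq)]
  | case2 l t hne ih =>
    rw [pvLoop, if_neg (show ¬ (pvOnePass l).length = l.length from hne)]
    rw [ih, foldl_pvOnePass l [] (by simp)]

-- The result of B's loop is a fixpoint of the pass.
theorem pvLoop_fix : ∀ l : List Char, pvOnePass (pvLoop l) = pvLoop l := by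
  intro l
  induction l using pvLoop.induct with
  | case1 l t heq =>
    rw [pvLoop, if_pos (show (pvOnePass l).length = l.length from heq)]
    rcases pvOnePass_eq_or_lt l with h | h
    · exact h
    · have h2 : (pvOnePass l).length = l.length := heq
      omega
  | case2 l t hne ih =>
    rw [pvLoop, if_neg (show ¬ (pvOnePass l).length = l.length from hne)]
    exact ih

-- On a list with no adjacent duplicates A's stack is the reversed list.
theorem foldl_chain : ∀ (l st : List Char), l.IsChain (· ≠ ·) →
    (∀ c, st.head? = some c → l.head? ≠ some c) →
    l.foldl pvStepA st = l.reverse ++ st := by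
  intro l
  induction l with
  | nil => intro st _ _; simp
  | cons c rest ih =>
    intro st hch hhd
    have hstep : pvStepA st c = c :: st := by
      unfold pvStepA
      rcases st with _ | ⟨d, t⟩
      · simp
      · have h1 : ¬ (some d = some c) := by
          intro h'
          exact hhd d rfl (by rw [Option.some.inj h']; simp)
        simp [h1]
    rw [List.foldl_cons, hstep, ih (c :: st) (List.isChain_cons.mp hch).2 ?_]
    · simp
    · intro e he hre
      simp only [List.head?_cons, Option.some.injEq] at he
      subst he
      rcases rest with _ | ⟨r, rs⟩
      · simp at hre
      · simp only [List.head?_cons, Option.some.injEq] at hre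
        exact (List.isChain_cons.mp hch).1 r rfl hre.symm

-- ===== VERDICT (by name: the statement is the Claim_ definition above) =====
theorem solution_spec : Claim_equal_solution := by
  intro s _
  unfold Spec_solution solution solution_alt
  have h1 : (pvLoop s.toList).foldl pvStepA [] = s.toList.foldl pvStepA [] :=
    foldl_pvLoop s.toList
  have h2 : (pvLoop s.toList).foldl pvStepA [] = (pvLoop s.toList).reverse ++ [] := by
    apply foldl_chain
    · exact pvOnePass_fix_chain _ (pvLoop_fix s.toList)
    · intro c hc; simp at hc
  have h3 : s.toList.foldl pvStepA [] = (pvLoop s.toList).reverse := by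
    rw [← h1, h2, List.append_nil]
  by_cases he : pvLoop s.toList = []
  · simp [h3, he]
  · have : (pvLoop s.toList).reverse ≠ [] := by simpa using he
    simp [h3, he, this]
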